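-- pv_equiv track=rewrite | github.com/WenxiongLiao/KGDA | data_processing/data_washing.py | checkUpperWords
-- ===== SOURCE A (Python) =====
-- def checkUpperWords(line):
--     """Filter lines with two consecutive words in all uppercase"""
--
--     def allUpper(word):
--         for ch in word:
--             if not 'A' <= ch <= 'Z':
--                 return False
--         return True
--
--     cntUpperWord = 0
--     for word in line.split():
--         if allUpper(word):
--             cntUpperWord += 1
--             if cntUpperWord == 2:
--                 return False
--         else:
--             cntUpperWord = 0
--     return True
-- ===== SOURCE B (Python) =====
-- def checkUpperWords(line):
--     """Filter lines with two consecutive words in all uppercase"""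
--     prev = False      # last completed word was entirely 'A'..'Z'
--     cur = True        # current word so far entirely 'A'..'Z'
--     in_word = False
--     for ch in line + ' ':          # trailing sentinel flushes the last word
--         if ch in ' \t\n\r\x0b\x0c':
--             if in_word:
--                 if prev and cur:
--                     return False
--                 prev = cur
--                 in_word = False
--         else:
--             if not in_word:
--                 in_word = True
--                 cur = True
--             cur = cur and ('A' <= ch <= 'Z')
--     return True
-- ===== Notes on version B (the rewrite author's own statement) =====
-- stated objective: alternative
-- what changed: Replaces the split-into-words pass plus running-counter word loop by a single character-level state machine over the raw string (with a trailing whitespace sentinel) that never materialises the word list.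
import Mathlib
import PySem

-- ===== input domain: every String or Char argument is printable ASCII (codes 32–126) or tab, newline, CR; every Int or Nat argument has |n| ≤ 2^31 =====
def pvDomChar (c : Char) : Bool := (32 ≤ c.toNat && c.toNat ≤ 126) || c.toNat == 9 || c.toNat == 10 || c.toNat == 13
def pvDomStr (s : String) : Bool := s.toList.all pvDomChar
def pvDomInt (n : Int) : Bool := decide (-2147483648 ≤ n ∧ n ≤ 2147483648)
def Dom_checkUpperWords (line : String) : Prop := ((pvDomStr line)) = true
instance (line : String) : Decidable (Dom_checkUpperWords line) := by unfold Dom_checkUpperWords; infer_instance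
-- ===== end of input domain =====

-- B replaces A's split()-then-word-loop by a character-level state machine over the raw string (objective: alternative, same cost).

-- ===== PORT A =====
-- allUpper(word): char loop with early return False
def pvAllUpperA : List Char → Bool
  | [] => true
  | ch :: rest => if 'A' ≤ ch ∧ ch ≤ 'Z' then pvAllUpperA rest else false

-- the main loop over line.split() with the running counter and early return
def pvLoopA : List (List Char) → Nat → Bool
  | [], _ => true
  | w :: ws, cnt =>
    if pvAllUpperA w then
      if cnt + 1 == 2 then false else pvLoopA ws (cnt + 1)
    else pvLoopA ws 0

def checkUpperWords (line : String) : Bool :=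
  pvLoopA (PySem.Chars.split₀ line.toList) 0

-- ===== PORT B =====
-- 'ch in " \t\n\r\x0b\x0c"' of Source B
def pvIsWsB (c : Char) : Bool :=
  c == ' ' || c == '\t' || c == '\n' || c == '\r' || c == '\x0b' || c == '\x0c'

-- the character loop of Source B with state (prev, cur, in_word) and early return False
def pvLoopB : List Char → Bool → Bool → Bool → Bool
  | [], _, _, _ => true
  | ch :: rest, prev, cur, inW =>
    if pvIsWsB ch then
      if inW then
        if prev && cur then false else pvLoopB rest cur cur false
      else pvLoopB rest prev cur inW
    else
      let cur1 := if inW then cur else true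
      pvLoopB rest prev (cur1 && decide ('A' ≤ ch ∧ ch ≤ 'Z')) true

def checkUpperWords_alt (line : String) : Bool :=
  pvLoopB (line.toList ++ [' ']) false true false

-- ===== PRECONDITION & SPEC =====
def Spec_checkUpperWords (line : String) (out : Bool) : Prop := out = checkUpperWords_alt line
instance (line : String) (out : Bool) : Decidable (Spec_checkUpperWords line out) := by unfold Spec_checkUpperWords; infer_instance

-- ===== CLAIM (what is proved, stated in full; the proofs are below) =====
def Claim_equal_checkUpperWords : Prop := ∀ (line : String), Dom_checkUpperWords line → Spec_checkUpperWords line (checkUpperWords line)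

-- ===== LEMMAS AND PROOFS =====

def pvUp (c : Char) : Bool := decide ('A' ≤ c ∧ c ≤ 'Z')

lemma pvAllUpperA_eq_all (w : List Char) : pvAllUpperA w = w.all pvUp := by
  induction w with
  | nil => rfl
  | cons c rest ih =>
    simp only [pvAllUpperA, List.all_cons, ih, pvUp]
    split_ifs with h <;> simp [h]

-- pairwise "two consecutive true flags" on a boolean list
def pvPairAny (fs : List Bool) : Bool := (fs.zip fs.tail).any (fun p => p.1 && p.2)

lemma pvPairAny_cons (b : Bool) (fs : List Bool) :
    pvPairAny (b :: fs) = ((b && fs.headD false) || pvPairAny fs) := by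
  cases fs with
  | nil => simp [pvPairAny]
  | cons b2 rest => simp [pvPairAny, List.any_cons]

lemma pvLoopA_eq (ws : List (List Char)) (c : Nat) (hc : c ≤ 1) :
    pvLoopA ws c =
      !((pvPairAny (ws.map pvAllUpperA)) ||
        (decide (c = 1) && (ws.map pvAllUpperA).headD false)) := by
  induction ws generalizing c with
  | nil => simp [pvLoopA, pvPairAny]
  | cons w ws ih =>
    simp only [pvLoopA, List.map_cons, pvPairAny_cons]
    by_cases hb : pvAllUpperA w = true
    · rw [if_pos hb, hb]
      interval_cases c
      · simp only [show ¬(0 + 1 = 2) from by omega, beq_iff_eq]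
        rw [ih 1 (by omega)]
        simp [Bool.and_comm]
      · simp
    · rw [Bool.not_eq_true] at hb
      rw [if_neg (by simp [hb]), ih 0 (by omega)]
      simp [hb]

-- on the stated domain, Source B's whitespace set coincides with Python's str.split whitespace
lemma pvIsWsB_eq_isspace (c : Char) (h : pvDomChar c = true) :
    pvIsWsB c = PySem.Chars.isspace c := by
  have e : ∀ d : Char, (c == d) = decide (c.toNat = d.toNat) := by
    intro d
    by_cases hcd : c = d
    · subst hcd; simp
    · have hne : c.toNat ≠ d.toNat := fun hh =>
        hcd (by rw [← Char.ofNat_toNat c, hh, Char.ofNat_toNat])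
      simp [hcd, hne]
  have hp : ((32 ≤ c.toNat ∧ c.toNat ≤ 126) ∨ c.toNat = 9) ∨ c.toNat = 10 ∨ c.toNat = 13 := by
    unfold pvDomChar at h
    simpa [or_assoc] using h
  unfold pvIsWsB PySem.Chars.isspace
  rw [e ' ', e '\t', e '\n', e '\r', e '\x0b', e '\x0c']
  rw [show (' ' : Char).toNat = 32 from rfl, show ('\t' : Char).toNat = 9 from rfl,
      show ('\n' : Char).toNat = 10 from rfl, show ('\r' : Char).toNat = 13 from rfl,
      show ('\x0b' : Char).toNat = 11 from rfl, show ('\x0c' : Char).toNat = 12 from rfl]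
  simp only [← Bool.decide_and, ← Bool.decide_or, decide_eq_decide]
  omega

-- split₀.go prepends the accumulator
lemma pvGo_acc (cs : List Char) (cur : List Char) (acc : List (List Char)) :
    PySem.Chars.split₀.go cs cur acc = acc.reverse ++ PySem.Chars.split₀.go cs cur [] := by
  induction cs generalizing cur acc with
  | nil =>
    by_cases hc : cur.isEmpty <;> simp [PySem.Chars.split₀.go, hc]
  | cons c rest ih =>
    by_cases hs : PySem.Chars.isspace c
    · by_cases hc : cur.isEmpty
      · simp only [PySem.Chars.split₀.go, hs, hc, if_true]
        exact ih [] acc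
      · simp only [PySem.Chars.split₀.go, hs, hc, if_true]
        rw [ih [] (cur.reverse :: acc), ih [] [cur.reverse]]
        simp
    · simp only [PySem.Chars.split₀.go, hs]
      exact ih (c :: cur) acc

-- the flags of the words produced by go, as a boolean list
def pvFlags (ws : List (List Char)) : List Bool := ws.map (fun w => w.all pvUp)

lemma pvFlags_cons (w : List Char) (ws : List (List Char)) :
    pvFlags (w :: ws) = w.all pvUp :: pvFlags ws := rfl

-- main invariant: the char-level machine equals the pairwise condition on the remaining words
lemma pvLoopB_eq (cs : List Char) (cur : List Char) (b prev : Bool)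
    (hd : cs.all pvDomChar = true)
    (hb : cur ≠ [] → b = cur.all pvUp) :
    pvLoopB (cs ++ [' ']) prev b (!cur.isEmpty) =
      !((prev && (pvFlags (PySem.Chars.split₀.go cs cur [])).headD false) ||
        pvPairAny (pvFlags (PySem.Chars.split₀.go cs cur []))) := by
  induction cs generalizing cur b prev with
  | nil =>
    cases cur with
    | nil =>
      simp [pvLoopB, pvIsWsB, PySem.Chars.split₀.go, pvFlags, pvPairAny]
    | cons x xs =>
      rw [hb (by simp)]
      simp only [List.nil_append, pvLoopB, show pvIsWsB ' ' = true from rfl, if_true,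
        List.isEmpty_cons, Bool.not_false]
      rw [show PySem.Chars.split₀.go [] (x :: xs) [] = [(x :: xs).reverse] from by
        simp [PySem.Chars.split₀.go]]
      rw [pvFlags_cons, List.headD_cons, List.all_reverse,
        show pvFlags [] = [] from rfl,
        show pvPairAny [(x :: xs).all pvUp] = false from by simp [pvPairAny]]
      cases hpa : (prev && ((x :: xs).all pvUp)) <;> simp
  | cons c rest ih =>
    have hdc : pvDomChar c = true := by
      simp only [List.all_cons, Bool.and_eq_true] at hd; exact hd.1
    have hdr : rest.all pvDomChar = true := by
      simp only [List.all_cons, Bool.and_eq_true] at hd; exact hd.2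
    rw [List.cons_append]
    by_cases hs : PySem.Chars.isspace c
    · cases cur with
      | nil =>
        simp only [pvLoopB, pvIsWsB_eq_isspace c hdc, hs, if_true, List.isEmpty_nil,
          Bool.not_true, Bool.false_eq_true, if_false]
        rw [show PySem.Chars.split₀.go (c :: rest) [] [] = PySem.Chars.split₀.go rest [] [] from by
          simp [PySem.Chars.split₀.go, hs]]
        have := ih [] b prev hdr (by intro hcontra; exact absurd rfl hcontra)
        simpa using this
      | cons x xs =>
        have hbv : b = (x :: xs).all pvUp := hb (by simp)
        simp only [pvLoopB, pvIsWsB_eq_isspace c hdc, hs, if_true, List.isEmpty_cons,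
          Bool.not_false]
        have hgo : PySem.Chars.split₀.go (c :: rest) (x :: xs) []
            = (x :: xs).reverse :: PySem.Chars.split₀.go rest [] [] := by
          simp only [PySem.Chars.split₀.go, hs, if_true, List.isEmpty_cons,
            Bool.false_eq_true, if_false]
          rw [pvGo_acc rest [] [(x :: xs).reverse]]
          simp
        rw [hgo, pvFlags_cons, pvPairAny_cons, List.headD_cons, List.all_reverse]
        by_cases hpb : (prev && b) = true
        · rw [if_pos hpb]
          rw [hbv] at hpb
          rw [hpb, Bool.true_or, Bool.not_true]
        · rw [if_neg hpb]
          rw [hbv] at hpb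
          rw [Bool.not_eq_true] at hpb
          rw [hpb, Bool.false_or]
          have := ih [] b b hdr (by intro hcontra; exact absurd rfl hcontra)
          simp only [List.isEmpty_nil, Bool.not_true] at this
          rw [this, hbv]
    · have hgo : PySem.Chars.split₀.go (c :: rest) cur []
          = PySem.Chars.split₀.go rest (c :: cur) [] := by
        simp [PySem.Chars.split₀.go, hs]
      simp only [pvLoopB, pvIsWsB_eq_isspace c hdc, hs, Bool.false_eq_true, if_false]
      rw [hgo]
      cases cur with
      | nil =>
        simp only [List.isEmpty_nil, Bool.not_true, Bool.false_eq_true, if_false]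
        have := ih [c] (true && pvUp c) prev hdr (by intro _; simp [pvUp])
        simpa [pvUp] using this
      | cons x xs =>
        have hbv : b = (x :: xs).all pvUp := hb (by simp)
        simp only [List.isEmpty_cons, Bool.not_false, if_true]
        have := ih (c :: x :: xs) (b && pvUp c) prev hdr
          (by intro _; rw [hbv]; simp [pvUp, Bool.and_comm])
        simpa [pvUp] using this

-- ===== VERDICT (by name: the statement is the Claim_ definition above) =====
theorem checkUpperWords_spec : Claim_equal_checkUpperWords := by
  intro line hdom
  unfold Spec_checkUpperWords checkUpperWords checkUpperWords_alt
  have hd : line.toList.all pvDomChar = true := hdom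
  have hB := pvLoopB_eq line.toList [] true false hd (by intro h; exact absurd rfl h)
  simp only [List.isEmpty_nil, Bool.not_true, Bool.false_and, Bool.false_or] at hB
  rw [hB, pvLoopA_eq _ 0 (by omega)]
  have hf : (PySem.Chars.split₀ line.toList).map pvAllUpperA
      = pvFlags (PySem.Chars.split₀.go line.toList [] []) := by
    simp [pvFlags, pvAllUpperA_eq_all, PySem.Chars.split₀]
  rw [hf, show (decide (0 = 1)) = false from rfl]
  rw [Bool.false_and, Bool.or_false]
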